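-- pv_equiv track=rewrite | github.com/Judongsung/algorithm | 백준/Gold/7490. 0 만들기/0 만들기.py | calc_formula
-- ===== SOURCE A (Python) =====
-- ATTACH = 0
--
-- FUNCS = [lambda a,b: a*10+b, lambda a,b: a+b, lambda a,b: a-b]
--
-- def calc_formula(nums: list, exps: list) -> int:
--     num_stack = [nums[0]]
--     exp_stack = []
--     np = 1
--     for exp in exps:
--         if exp == ATTACH:
--             num_stack[-1] = FUNCS[exp](num_stack[-1], nums[np])
--         else:
--             num_stack.append(nums[np])
--             exp_stack.append(exp)
--         np += 1
--
--     result = num_stack[0]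
--     for i, exp in enumerate(exp_stack):
--         result = FUNCS[exp](result, num_stack[i+1])
--
--     return result
-- ===== SOURCE B (Python) =====
-- def calc_formula(nums: list, exps: list) -> int:
--     SIGN = {1: 1, 2: -1}
--     result = 0
--     sign = 1
--     current = nums[0]
--     np = 1
--     for exp in exps:
--         if exp == 0:
--             current = current * 10 + nums[np]
--         else:
--             result += sign * current
--             sign = SIGN[exp]
--             current = nums[np]
--         np += 1
--     return result + sign * current
-- ===== Notes on version B (the rewrite author's own statement) =====
-- stated objective: simpler
-- what changed: Replaces A's two-pass scheme (build num_stack/exp_stack, then a second reduction loop over the stacks) by a single pass that keeps only three scalars: accumulated result, pending sign (from a {1:+1, 2:-1} table), and the current concatenated number.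
-- outside the precondition, e.g. on calc_formula([1, 2], [-2]): A returns 3, B raises KeyError; on calc_formula([1, 2], [-3]): A returns 12, B raises KeyError
import Mathlib
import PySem

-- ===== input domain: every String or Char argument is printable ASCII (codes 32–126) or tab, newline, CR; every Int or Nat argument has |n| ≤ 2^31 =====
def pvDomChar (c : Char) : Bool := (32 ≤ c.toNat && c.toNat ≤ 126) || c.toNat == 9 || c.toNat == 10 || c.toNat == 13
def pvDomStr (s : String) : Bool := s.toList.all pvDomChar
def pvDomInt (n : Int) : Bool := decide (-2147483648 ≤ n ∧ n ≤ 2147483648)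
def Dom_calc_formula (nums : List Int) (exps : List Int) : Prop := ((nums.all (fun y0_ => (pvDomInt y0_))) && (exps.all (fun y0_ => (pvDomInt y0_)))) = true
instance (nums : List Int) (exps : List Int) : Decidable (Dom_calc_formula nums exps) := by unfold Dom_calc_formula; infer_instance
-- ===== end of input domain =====

-- B replaces A's two stacks and second reduction pass by a single pass over the operators
-- keeping three scalars (result, sign, current); objective: simpler, same O(n) cost.


-- ===== PORT A =====
-- FUNCS[e](a, b): list lookup with Python index semantics; the 0 default is taken only where
-- Python raises IndexError (outside Pre_).
def pyFUNCS (e a b : Int) : Int :=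
  match PySem.List.pyGet? [fun a b => a * 10 + b, fun a b => a + b, fun a b => a - (b : Int)] e with
  | some f => f a b
  | none => 0

-- body of A's first loop: state (num_stack, exp_stack, np)
def stepA (nums : List Int) : (List Int × List Int × Int) → Int → (List Int × List Int × Int)
  | (ns, es, np), exp =>
    if exp == 0 then
      (PySem.List.pySetD ns (-1) (pyFUNCS exp (PySem.List.pyGetD ns (-1) 0) (PySem.List.pyGetD nums np 0)), es, np + 1)
    else
      (ns ++ [PySem.List.pyGetD nums np 0], es ++ [exp], np + 1)

-- body of A's second loop ('for i, exp in enumerate(exp_stack)'; the index i is carried explicitly)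
def stepRed (ns : List Int) : (Int × Int) → Int → (Int × Int)
  | (r, i), exp => (pyFUNCS exp r (PySem.List.pyGetD ns (i + 1) 0), i + 1)

def calc_formula (nums : List Int) (exps : List Int) : Int :=
  let st := exps.foldl (stepA nums) ([PySem.List.pyGetD nums 0 0], ([] : List Int), (1 : Int))
  let result := PySem.List.pyGetD st.1 0 0
  (st.2.1.foldl (stepRed st.1) (result, (0 : Int))).1

-- ===== PORT B =====
-- SIGN = {1: 1, 2: -1}; SIGN[exp] raises KeyError outside, so the default is only taken outside Pre_.
def pySIGN : PySem.Dict Int Int := PySem.Dict.ofList [(1, 1), (2, -1)]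

-- single pass: state (result, sign, current, np)
def stepB (nums : List Int) : (Int × Int × Int × Int) → Int → (Int × Int × Int × Int)
  | (r, s, c, np), exp =>
    if exp == 0 then
      (r, s, c * 10 + PySem.List.pyGetD nums np 0, np + 1)
    else
      (r + s * c, (PySem.Dict.get? pySIGN exp).getD 0, PySem.List.pyGetD nums np 0, np + 1)

def calc_formula_alt (nums : List Int) (exps : List Int) : Int :=
  let bt := exps.foldl (stepB nums) (0, 1, PySem.List.pyGetD nums 0 0, 1)
  bt.1 + bt.2.1 * bt.2.2.1

-- ===== PRECONDITION & SPEC =====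
-- Pre_ keeps the problem's operator codes {0,1,2} and requires one operand per operator: outside
-- it A raises IndexError, except for codes -1/-2/-3, where FUNCS[exp] indexes the table from the
-- end; B's sign table raises KeyError on every code other than 0/1/2 (excluded; see cites).
def Pre_calc_formula (nums : List Int) (exps : List Int) : Prop :=
  exps.length + 1 ≤ nums.length ∧ ∀ e ∈ exps, e = 0 ∨ e = 1 ∨ e = 2
instance (nums : List Int) (exps : List Int) : Decidable (Pre_calc_formula nums exps) := by unfold Pre_calc_formula; infer_instance

def pvWitness_calc_formula : List Int × List Int := ([7, 1, 2, 3], [0, 1, 2])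

def Spec_calc_formula (nums : List Int) (exps : List Int) (out : Int) : Prop := out = calc_formula_alt nums exps
instance (nums : List Int) (exps : List Int) (out : Int) : Decidable (Spec_calc_formula nums exps out) := by unfold Spec_calc_formula; infer_instance

-- ===== CLAIM (what is proved, stated in full; the proofs are below) =====
def Claim_equal_calc_formula : Prop := ∀ (nums : List Int) (exps : List Int), Dom_calc_formula nums exps → Pre_calc_formula nums exps → Spec_calc_formula nums exps (calc_formula nums exps)

-- ===== LEMMAS AND PROOFS =====

theorem pyFUNCS_zero (a b : Int) : pyFUNCS 0 a b = a * 10 + b := rfl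
theorem pyFUNCS_one (a b : Int) : pyFUNCS 1 a b = a + b := rfl
theorem pyFUNCS_two (a b : Int) : pyFUNCS 2 a b = a - b := rfl

-- replaying A's second loop as a two-list recursion
def red (r : Int) : List Int → List Int → Int
  | e :: es, n :: ns => red (pyFUNCS e r n) es ns
  | _, _ => r

-- signed linear combination (what red computes when every operator is + or -)
def lin : List Int → List Int → Int
  | e :: es, n :: ns => (if e = 1 then 1 else -1) * n + lin es ns
  | _, _ => 0

-- sign of the last pending operator (1 when none)
def slast (es : List Int) : Int := if es.getLastD 1 = 1 then 1 else -1

theorem red_eq_lin (es : List Int) : ∀ (ns : List Int) (r : Int),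
    (∀ e ∈ es, e = 1 ∨ e = 2) → es.length = ns.length →
    red r es ns = r + lin es ns := by
  induction es with
  | nil => intro ns r _ _; cases ns <;> simp [red, lin]
  | cons e es ih =>
    intro ns r hmem hlen
    cases ns with
    | nil => simp at hlen
    | cons n ns =>
      have he := hmem e (by simp)
      have : red r (e :: es) (n :: ns) = red (pyFUNCS e r n) es ns := rfl
      rw [this, ih ns _ (fun x hx => hmem x (by simp [hx])) (by simpa using hlen)]
      rcases he with h | h <;> subst h <;> simp [pyFUNCS_one, pyFUNCS_two, lin] <;> ring

theorem lin_append (es : List Int) : ∀ (ns : List Int) (e x : Int),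
    es.length = ns.length →
    lin (es ++ [e]) (ns ++ [x]) = lin es ns + (if e = 1 then 1 else -1) * x := by
  induction es with
  | nil => intro ns e x hlen; cases ns <;> simp_all [lin]
  | cons a as ih =>
    intro ns e x hlen
    cases ns with
    | nil => simp at hlen
    | cons n ns =>
      simp only [List.cons_append, lin]
      rw [ih ns e x (by simpa using hlen)]; ring

-- A's post-loop value on a stack ns with pending operators es
def aval : List Int → List Int → Int
  | n :: rest, es => red n es rest
  | [], _ => 0

theorem aval_append (front : List Int) (c : Int) (es : List Int) (e x : Int)
    (hmem : ∀ a ∈ es, a = 1 ∨ a = 2) (he : e = 1 ∨ e = 2)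
    (hlen : front.length = es.length) :
    aval ((front ++ [c]) ++ [x]) (es ++ [e]) = aval (front ++ [c]) es + (if e = 1 then 1 else -1) * x := by
  cases front with
  | nil =>
    have hes : es = [] := by simpa using List.eq_nil_of_length_eq_zero hlen.symm
    subst hes
    rcases he with h | h <;> subst h <;> simp [aval, red, pyFUNCS_one, pyFUNCS_two, sub_eq_add_neg]
  | cons f0 fr =>
    have hmem' : ∀ a ∈ es ++ [e], a = 1 ∨ a = 2 := by
      intro a ha; rcases List.mem_append.1 ha with h | h
      · exact hmem a h
      · simp at h; subst h; exact he
    have hlen1 : es.length = (fr ++ [c]).length := by simp at hlen ⊢; omega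
    have hlen2 : (es ++ [e]).length = ((fr ++ [c]) ++ [x]).length := by simp at hlen ⊢; omega
    show red f0 (es ++ [e]) ((fr ++ [c]) ++ [x]) = red f0 es (fr ++ [c]) + _
    rw [red_eq_lin _ _ _ hmem' hlen2, red_eq_lin _ _ _ hmem hlen1,
      lin_append es (fr ++ [c]) e x hlen1]
    ring

theorem aval_setLast (front : List Int) (c x : Int) (es : List Int)
    (hmem : ∀ a ∈ es, a = 1 ∨ a = 2) (hlen : front.length = es.length) :
    aval (front ++ [x]) es = aval (front ++ [c]) es + slast es * (x - c) := by
  rcases List.eq_nil_or_concat es with hes | ⟨es0, eL, hes⟩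
  · subst hes
    have : front = [] := by simpa using List.eq_nil_of_length_eq_zero hlen
    subst this
    simp [aval, red, slast]
  · subst hes
    simp only [List.concat_eq_append] at hmem hlen ⊢
    cases front with
    | nil => simp at hlen
    | cons f0 fr =>
      have hlenx : (es0 ++ [eL]).length = (fr ++ [x]).length := by simp at hlen ⊢; omega
      have hlenc : (es0 ++ [eL]).length = (fr ++ [c]).length := by simp at hlen ⊢; omega
      have hlen0 : es0.length = fr.length := by simp at hlen ⊢; omega
      show red f0 (es0 ++ [eL]) (fr ++ [x]) = red f0 (es0 ++ [eL]) (fr ++ [c]) + _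
      rw [red_eq_lin _ _ _ hmem hlenx, red_eq_lin _ _ _ hmem hlenc,
        lin_append es0 fr eL x hlen0, lin_append es0 fr eL c hlen0]
      simp [slast]
      split_ifs <;> ring

theorem pySetD_append_neg_one (front : List Int) (c v : Int) :
    PySem.List.pySetD (front ++ [c]) (-1) v = front ++ [v] := by
  simp [PySem.List.pySetD, PySem.List.pySet?, PySem.List.pyIdx?]

theorem foldred (ns : List Int) (es : List Int) : ∀ (i : Nat) (r : Int),
    i + 1 + es.length ≤ ns.length →
    (es.foldl (stepRed ns) (r, (i : Int))).1 = red r es (ns.drop (i + 1)) := by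
  induction es with
  | nil => intro i r _; simp [red]
  | cons e es ih =>
    intro i r hle
    have hi1 : i + 1 < ns.length := by simp at hle; omega
    have hstep : stepRed ns (r, (i : Int)) e
        = (pyFUNCS e r (PySem.List.pyGetD ns ((i : Int) + 1) 0), (i : Int) + 1) := rfl
    have hcast : ((i : Int) + 1) = ((i + 1 : Nat) : Int) := by push_cast; ring
    have hget : PySem.List.pyGetD ns ((i : Int) + 1) 0 = ns[i + 1] := by
      rw [hcast, PySem.List.pyGetD_natCast]
      exact List.getD_eq_getElem ns 0 hi1
    have hdrop : ns.drop (i + 1) = ns[i + 1] :: ns.drop (i + 2) := by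
      rw [List.drop_eq_getElem_cons hi1]
    rw [List.foldl_cons, hstep, hget, hcast, ih (i + 1) _ (by simp at hle ⊢; omega), hdrop]
    rfl

theorem loop_inv (nums : List Int) (exps : List Int) : ∀ (front : List Int) (c : Int) (es : List Int) (r np : Int),
    (∀ e ∈ exps, e = 0 ∨ e = 1 ∨ e = 2) →
    (∀ e ∈ es, e = 1 ∨ e = 2) →
    front.length = es.length →
    aval (front ++ [c]) es = r + slast es * c →
    (let st := exps.foldl (stepA nums) (front ++ [c], es, np)
     let bt := exps.foldl (stepB nums) (r, slast es, c, np)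
     aval st.1 st.2.1 = bt.1 + bt.2.1 * bt.2.2.1
       ∧ st.1.length = st.2.1.length + 1
       ∧ ∀ e ∈ st.2.1, e = 1 ∨ e = 2) := by
  induction exps with
  | nil =>
    intro front c es r np _ hes hlen hval
    refine ⟨by simpa [stepB] using hval, by simp; omega, hes⟩
  | cons exp exps ih =>
    intro front c es r np hexps hes hlen hval
    have hexp := hexps exp (by simp)
    have hexps' : ∀ e ∈ exps, e = 0 ∨ e = 1 ∨ e = 2 := fun e he => hexps e (by simp [he])
    simp only [List.foldl_cons]
    rcases hexp with h0 | h12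
    · subst h0
      have hA : stepA nums (front ++ [c], es, np) 0
          = (front ++ [c * 10 + PySem.List.pyGetD nums np 0], es, np + 1) := by
        simp [stepA, pyFUNCS_zero, PySem.List.pyGetD_neg_one_append_singleton,
          pySetD_append_neg_one]
      have hB : stepB nums (r, slast es, c, np) 0
          = (r, slast es, c * 10 + PySem.List.pyGetD nums np 0, np + 1) := by
        simp [stepB]
      rw [hA, hB]
      exact ih front (c * 10 + PySem.List.pyGetD nums np 0) es r (np + 1) hexps' hes hlen
        (by rw [aval_setLast front c _ es hes hlen, hval]; ring)
    · have hne : (exp == 0) = false := by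
        rcases h12 with h | h <;> simp [h]
      have hA : stepA nums (front ++ [c], es, np) exp
          = ((front ++ [c]) ++ [PySem.List.pyGetD nums np 0], es ++ [exp], np + 1) := by
        simp [stepA, hne]
      have hsl : slast (es ++ [exp]) = if exp = 1 then 1 else -1 := by
        rcases h12 with h | h <;> subst h <;> simp [slast]
      have hB : stepB nums (r, slast es, c, np) exp
          = (r + slast es * c, slast (es ++ [exp]), PySem.List.pyGetD nums np 0, np + 1) := by
        have hsign : (PySem.Dict.get? pySIGN exp).getD 0 = slast (es ++ [exp]) := by
          rw [hsl]; rcases h12 with h | h <;> subst h <;> decide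
        simp [stepB, hne, hsign]
      rw [hA, hB]
      refine ih (front ++ [c]) (PySem.List.pyGetD nums np 0) (es ++ [exp]) (r + slast es * c)
        (np + 1) hexps' ?_ (by simp [hlen]) ?_
      · intro e he'; rcases List.mem_append.1 he' with h | h
        · exact hes e h
        · simp at h; subst h; exact h12
      · rw [aval_append front c es exp _ hes h12 hlen, hval, hsl]

-- ===== VERDICT (by name: the statement is the Claim_ definition above) =====
theorem calc_formula_spec : Claim_equal_calc_formula := by
  intro nums exps _ hpre
  rcases hpre with ⟨hlen, hmem⟩
  have hinv := loop_inv nums exps [] (PySem.List.pyGetD nums 0 0) [] 0 1 hmem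
    (by simp) (by simp) (by simp [aval, red, slast])
  rw [show slast ([] : List Int) = 1 from by simp [slast]] at hinv
  simp only [List.nil_append] at hinv
  obtain ⟨hval, hlen', hes'⟩ := hinv
  set st := exps.foldl (stepA nums) ([PySem.List.pyGetD nums 0 0], ([] : List Int), (1 : Int)) with hst
  set bt := exps.foldl (stepB nums) ((0 : Int), (1 : Int), PySem.List.pyGetD nums 0 0, (1 : Int)) with hbt
  have hA : calc_formula nums exps
      = (st.2.1.foldl (stepRed st.1) (PySem.List.pyGetD st.1 0 0, ((0 : Nat) : Int))).1 := rfl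
  have hB : calc_formula_alt nums exps = bt.1 + bt.2.1 * bt.2.2.1 := rfl
  show calc_formula nums exps = calc_formula_alt nums exps
  rw [hA, hB, foldred st.1 st.2.1 0 _ (by omega)]
  obtain ⟨n0, rest, hns⟩ : ∃ n0 rest, st.1 = n0 :: rest := by
    cases h : st.1 with
    | nil => rw [h] at hlen'; simp at hlen'
    | cons a l => exact ⟨a, l, rfl⟩
  rw [hns] at hval ⊢
  simpa [aval, PySem.List.pyGetD_zero_cons] using hval
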